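-- pv_equiv track=rewrite | github.com/PorametPat/qwanta | qwanta/Qubit/qubit.py | classical_error_correction
-- ===== SOURCE A (Python) =====
-- from typing import List, Union, Any, Callable, Optional
--
-- def classical_error_correction(codeword: List):
--     """
--     Method for classical error correction on input codeword using Steane generator.
--
--     Args:
--         codeword (List): List of measurement result of each qubit in self.physical_list
--
--     Returns:
--         (List, int): return a corrected codeword and position of error detected, -1 if there is no error.
--     """
--
--     # Check commutation with Generators
--     G = [[True, False, True, False, True, False, True], # G2
--          [False, True, True, False, False, True, True], # G3
--          [False, False, False, True, True, True, True]] # G1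
--     location_bool = [False, False, False]
--     for i in range(len(G)):
--         flag = False
--         for j, res in enumerate(codeword):
--             if res == G[i][j] and (res != False and G[i][j] != False):
--                 flag = not flag
--
--         location_bool[i] = flag
--
--     # Convert commutation result into location of noise, if -1 then there is no error.
--     location = int(''.join([str(int(i)) for i in location_bool])[::-1], base=2) - 1  # minus one becasue the shift of index
--
--     # Correct codeword if there is an error.
--     new_codeword = codeword[:]
--     corrected = False
--     if location != -1:
--         corrected = True
--         new_codeword[location] = not new_codeword[location]
--
--     return new_codeword, location
-- ===== SOURCE B (Python) =====
-- def classical_error_correction(codeword):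
--     """Single-pass Hamming syndrome decode: XOR the column index (j+1) of each
--     True bit, then flip the located bit (location = syndrome - 1; -1 = no error)."""
--     table = [1, 2, 3, 4, 5, 6, 7]
--     s = 0
--     for j, res in enumerate(codeword):
--         col = table[j]
--         if res == True:
--             s ^= col
--     location = s - 1
--     new_codeword = codeword[:]
--     if location != -1:
--         new_codeword[location] = not new_codeword[location]
--     return new_codeword, location
-- ===== Notes on version B (the rewrite author's own statement) =====
-- stated objective: simpler
-- what changed: Replaced the three nested generator parity loops plus string/binary-reversal conversion by a single pass that XORs the Hamming column index of each True bit into the syndrome.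
import Mathlib
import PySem

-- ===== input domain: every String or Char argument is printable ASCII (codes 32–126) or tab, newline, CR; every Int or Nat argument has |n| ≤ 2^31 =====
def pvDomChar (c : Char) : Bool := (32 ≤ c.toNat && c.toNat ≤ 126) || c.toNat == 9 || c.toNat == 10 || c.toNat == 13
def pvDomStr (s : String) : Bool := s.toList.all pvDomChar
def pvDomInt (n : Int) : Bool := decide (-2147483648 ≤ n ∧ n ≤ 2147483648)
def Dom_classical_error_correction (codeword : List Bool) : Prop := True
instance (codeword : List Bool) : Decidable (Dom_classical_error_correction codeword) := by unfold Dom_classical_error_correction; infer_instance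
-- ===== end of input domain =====

-- B replaces A's three nested generator parity loops and string/binary conversion by one
-- XOR-of-column-indices pass (objective: simpler). Equivalence is on the return value.

-- ===== PORT A =====
-- one generator row pass: 'flag = not flag' when res == G[i][j] and both non-False;
-- G[i][j] out of range (len(codeword) > 7) is an IndexError in Python → excluded by Pre_,
-- the port keeps flag unchanged there.
def pvRowFlag (g : List Bool) (codeword : List Bool) : Bool :=
  (PySem.List.enumerate codeword).foldl
    (fun flag jr =>
      match PySem.List.pyGet? g jr.1 with
      | some gj => if jr.2 == gj && (jr.2 != false && gj != false) then !flag else flag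
      | none => flag)
    false

def classical_error_correction (codeword : List Bool) : List Bool × Int :=
  let G : List (List Bool) :=
    [[true, false, true, false, true, false, true],
     [false, true, true, false, false, true, true],
     [false, false, false, true, true, true, true]]
  let location_bool : List Bool := G.map (fun g => pvRowFlag g codeword)
  -- int(''.join([str(int(i)) for i in location_bool])[::-1], base=2) - 1, by hand:
  -- digits of the reversed string read most-significant first
  let location : Int :=
    ((location_bool.map (fun b => if b then (1 : Int) else 0)).reverse.foldl
      (fun acc d => acc * 2 + d) 0) - 1
  let new_codeword :=
    if location ≠ -1 then
      -- new_codeword[location] = not new_codeword[location]; out-of-range is an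
      -- IndexError in Python → excluded by Pre_, pySetD leaves the list unchanged there
      match PySem.List.pyGet? codeword location with
      | some v => PySem.List.pySetD codeword location (!v)
      | none => codeword
    else codeword
  (new_codeword, location)

-- ===== PORT B =====
def classical_error_correction_alt (codeword : List Bool) : List Bool × Int :=
  let table : List Int := [1, 2, 3, 4, 5, 6, 7]
  let s : Int := (PySem.List.enumerate codeword).foldl
    (fun s jr =>
      match PySem.List.pyGet? table jr.1 with
      | some col => if jr.2 == true then Int.xor s col else s
      | none => s)
    0
  let location : Int := s - 1
  let new_codeword :=
    if location ≠ -1 then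
      match PySem.List.pyGet? codeword location with
      | some v => PySem.List.pySetD codeword location (!v)
      | none => codeword
    else codeword
  (new_codeword, location)

-- ===== PRECONDITION & SPEC =====
-- syndrome of the codeword: XOR of (position+1) over the True bits
def pvSyndrome (codeword : List Bool) : Nat :=
  (codeword.zipIdx.foldl (fun s p => if p.1 then s ^^^ (p.2 + 1) else s) 0)

-- Pre_ is exactly where Python A returns: len(codeword) ≤ 7 (else G[i][j] raises
-- IndexError) and the decoded error location is -1 or inside the list (else the
-- correction assignment raises IndexError). B raises on exactly the same inputs.
def Pre_classical_error_correction (codeword : List Bool) : Prop :=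
  codeword.length ≤ 7 ∧
    (pvSyndrome codeword = 0 ∨ pvSyndrome codeword ≤ codeword.length)
instance (codeword : List Bool) : Decidable (Pre_classical_error_correction codeword) := by
  unfold Pre_classical_error_correction; infer_instance

def pvWitness_classical_error_correction : List Bool :=
  [true, false, false, false, false, false, false]

def Spec_classical_error_correction (codeword : List Bool) (out : List Bool × Int) : Prop := out = classical_error_correction_alt codeword
instance (codeword : List Bool) (out : List Bool × Int) : Decidable (Spec_classical_error_correction codeword out) := by unfold Spec_classical_error_correction; infer_instance

-- ===== CLAIM (what is proved, stated in full; the proofs are below) =====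
def Claim_equal_classical_error_correction : Prop := ∀ (codeword : List Bool), Dom_classical_error_correction codeword → Pre_classical_error_correction codeword → Spec_classical_error_correction codeword (classical_error_correction codeword)

-- ===== LEMMAS AND PROOFS =====

-- all Bool lists of length ≤ n
def pvAllB : Nat → List (List Bool)
  | 0 => [[]]
  | n + 1 => [] :: (pvAllB n).flatMap (fun l => [true :: l, false :: l])

theorem pvAllB_complete : ∀ (n : Nat) (l : List Bool), l.length ≤ n → l ∈ pvAllB n := by
  intro n
  induction n with
  | zero =>
    intro l h
    cases l with
    | nil => simp [pvAllB]
    | cons a t => simp at h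
  | succ n ih =>
    intro l h
    cases l with
    | nil => simp [pvAllB]
    | cons a t =>
      have ht : t ∈ pvAllB n := ih t (by simpa using Nat.le_of_succ_le_succ h)
      have : a :: t ∈ (pvAllB n).flatMap (fun l => [true :: l, false :: l]) := by
        refine List.mem_flatMap.2 ⟨t, ht, ?_⟩
        cases a <;> simp
      simp [pvAllB, this]

set_option maxRecDepth 10000 in
theorem pv_exhaustive :
    ∀ l ∈ pvAllB 7, Pre_classical_error_correction l →
      classical_error_correction l = classical_error_correction_alt l := by decide

-- ===== VERDICT (by name: the statement is the Claim_ definition above) =====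
theorem classical_error_correction_spec : Claim_equal_classical_error_correction := by
  intro codeword _ hpre
  unfold Spec_classical_error_correction
  exact pv_exhaustive codeword (pvAllB_complete 7 codeword hpre.1) hpre
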